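-- pv_equiv track=rewrite | github.com/dhruvmadhwal/disagreement-based-abstention | generate/hotpotqa/pipeline.py | parse_open_ended_response
-- ===== SOURCE A (Python) =====
-- def parse_open_ended_response(text: str) -> str:
--     answer, section = "", None
--     for raw_line in text.splitlines():
--         line = raw_line.strip()
--         if line.lower().startswith("answer:"):
--             section = "answer"
--             answer = line.split(":", 1)[1].strip()
--         elif section == "answer" and line:
--             answer = f"{answer} {line}".strip()
--     if not answer:
--         answer = text.strip()
--     return answer.strip()
-- ===== SOURCE B (Python) =====
-- def parse_open_ended_response(text: str) -> str:
--     lines = [ln.strip() for ln in text.splitlines()]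
--     idx = None
--     for i, ln in enumerate(lines):
--         if ln.lower().startswith("answer:"):
--             idx = i
--     if idx is None:
--         return text.strip()
--     answer = lines[idx].split(":", 1)[1].strip()
--     for ln in lines[idx + 1:]:
--         if ln:
--             answer = (answer + " " + ln).strip()
--     return answer.strip() if answer else text.strip()
-- ===== Notes on version B (the rewrite author's own statement) =====
-- stated objective: alternative
-- what changed: Replaces A's single stateful pass (answer/section accumulator mutated per line) by a two-phase decomposition: strip all lines once, scan for the index of the last anchor line, then build the answer only from the lines after that index.
import Mathlib
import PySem

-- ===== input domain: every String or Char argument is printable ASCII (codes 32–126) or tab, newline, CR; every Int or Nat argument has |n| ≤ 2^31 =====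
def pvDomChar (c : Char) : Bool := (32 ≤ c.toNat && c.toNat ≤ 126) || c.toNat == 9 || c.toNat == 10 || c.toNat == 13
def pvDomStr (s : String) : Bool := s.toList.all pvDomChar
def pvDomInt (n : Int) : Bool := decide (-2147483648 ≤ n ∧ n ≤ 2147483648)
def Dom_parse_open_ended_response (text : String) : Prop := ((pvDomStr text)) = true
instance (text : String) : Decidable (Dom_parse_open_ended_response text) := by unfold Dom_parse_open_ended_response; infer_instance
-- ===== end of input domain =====

-- B changes the decomposition: strip all lines once, scan for the index of the last anchor line,
-- then accumulate over the suffix after that index only; same value as A everywhere (objective: alternative).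

-- ===== PORT A =====
-- line.split(":", 1)[1].strip(): under the startswith guard the split always has a second piece,
-- so the .getD defaults are unreachable
def pvContent (line : String) : String :=
  PySem.Str.strip (((PySem.Str.splitMax? line ":" 1).getD []).getD 1 "")

def pvAStep (st : String × Option String) (raw_line : String) : String × Option String :=
  let line := PySem.Str.strip raw_line
  if PySem.Str.startswith (PySem.Str.lower line) "answer:" then
    (pvContent line, some "answer")
  else if st.2 == some "answer" && !(line == "") then
    (PySem.Str.strip (st.1 ++ " " ++ line), st.2)
  else st

def parse_open_ended_response (text : String) : String :=
  let st := (PySem.Str.splitlines text).foldl pvAStep ("", none)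
  let answer := if st.1 == "" then PySem.Str.strip text else st.1
  PySem.Str.strip answer

-- ===== PORT B =====
-- the 'for ln in lines[idx+1:]' accumulation loop of Source B
def pvAppend (answer : String) (lns : List String) : String :=
  lns.foldl (fun a ln => if ln == "" then a else PySem.Str.strip (a ++ " " ++ ln)) answer

def parse_open_ended_response_alt (text : String) : String :=
  let lines := (PySem.Str.splitlines text).map PySem.Str.strip
  let idx := (PySem.List.enumerate lines 0).foldl
      (fun acc p => if PySem.Str.startswith (PySem.Str.lower p.2) "answer:" then some p.1 else acc)
      (none : Option Int)
  match idx with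
  | none => PySem.Str.strip text
  | some i =>
    -- lines[idx]: idx is a stored valid index, so the default is unreachable
    let answer := pvContent (PySem.List.pyGetD lines i "")
    let answer := pvAppend answer (PySem.List.slice lines (some (i + 1)) none)
    if answer == "" then PySem.Str.strip text else PySem.Str.strip answer

-- ===== PRECONDITION & SPEC =====
def Spec_parse_open_ended_response (text : String) (out : String) : Prop := out = parse_open_ended_response_alt text
instance (text : String) (out : String) : Decidable (Spec_parse_open_ended_response text out) := by unfold Spec_parse_open_ended_response; infer_instance

-- ===== CLAIM (what is proved, stated in full; the proofs are below) =====
def Claim_equal_parse_open_ended_response : Prop := ∀ (text : String), Dom_parse_open_ended_response text → Spec_parse_open_ended_response text (parse_open_ended_response text)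

-- ===== LEMMAS AND PROOFS =====

-- strip is idempotent
lemma dw_idem (p : Char → Bool) : ∀ l : List Char, List.dropWhile p (List.dropWhile p l) = List.dropWhile p l := by
  intro l
  induction l with
  | nil => simp
  | cons a t ih =>
    by_cases h : p a
    · simpa [h] using ih
    · simp [List.dropWhile_cons, h]

lemma lstrip_fix_rstrip (p : Char → Bool) (l : List Char) (h : List.dropWhile p l = l) :
    List.dropWhile p ((List.dropWhile p l.reverse).reverse) = (List.dropWhile p l.reverse).reverse := by
  have hpre : (List.dropWhile p l.reverse).reverse <+: l := by
    have hs : List.dropWhile p l.reverse <:+ l.reverse := List.dropWhile_suffix _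
    simpa using hs.reverse
  cases l with
  | nil => simp
  | cons a t =>
    by_cases hpa : p a
    · exfalso
      have h1 : List.dropWhile p (a :: t) = List.dropWhile p t := by simp [hpa]
      have h2 : (List.dropWhile p t).length ≤ t.length := List.length_dropWhile_le _ _
      rw [h1] at h
      have := congrArg List.length h
      simp at this
      omega
    · cases hr : (List.dropWhile p (a :: t).reverse).reverse with
      | nil => simp
      | cons b r' =>
        rw [hr] at hpre
        have hb : b = a := (List.cons_prefix_cons.mp hpre).1
        subst hb
        simp [List.dropWhile_cons, hpa]

lemma lstrip_rstrip_lstrip (l : List Char) :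
    PySem.Chars.lstrip (PySem.Chars.rstrip (PySem.Chars.lstrip l)) = PySem.Chars.rstrip (PySem.Chars.lstrip l) := by
  unfold PySem.Chars.lstrip PySem.Chars.rstrip
  exact lstrip_fix_rstrip _ _ (dw_idem _ _)

lemma rstrip_rstrip (m : List Char) : PySem.Chars.rstrip (PySem.Chars.rstrip m) = PySem.Chars.rstrip m := by
  unfold PySem.Chars.rstrip
  rw [List.reverse_reverse, dw_idem]

lemma chars_strip_strip (l : List Char) : PySem.Chars.strip (PySem.Chars.strip l) = PySem.Chars.strip l := by
  unfold PySem.Chars.strip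
  rw [lstrip_rstrip_lstrip, rstrip_rstrip]

lemma pv_strip_strip (s : String) : PySem.Str.strip (PySem.Str.strip s) = PySem.Str.strip s := by
  apply String.toList_injective
  simpa using chars_strip_strip s.toList

-- B's last-anchor scan, as a named function (definitionally the fold inside the alt port)
def pvIsAnchor (s : String) : Bool := PySem.Str.startswith (PySem.Str.lower s) "answer:"

def pvScan (lines : List String) : Option Int :=
  (PySem.List.enumerate lines 0).foldl
    (fun acc p => if PySem.Str.startswith (PySem.Str.lower p.2) "answer:" then some p.1 else acc)
    (none : Option Int)

lemma pvScan_append_singleton (l : List String) (x : String) :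
    pvScan (l ++ [x]) = if pvIsAnchor x then some (l.length : Int) else pvScan l := by
  unfold pvScan pvIsAnchor
  rw [PySem.List.enumerate_append, List.foldl_append]
  simp

lemma pvScan_bound : ∀ (l : List String) (i : Int), pvScan l = some i → 0 ≤ i ∧ i < l.length := by
  intro l
  induction l using List.reverseRecOn with
  | nil => intro i h; simp [pvScan, PySem.List.enumerate_nil] at h
  | append_singleton l x ih =>
    intro i h
    rw [pvScan_append_singleton] at h
    by_cases hx : pvIsAnchor x
    · simp [hx] at h
      subst h
      constructor <;> simp
    · simp [hx] at h
      have := ih i h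
      simp only [List.length_append, List.length_cons, List.length_nil]
      omega

lemma pvAppend_append_singleton (a : String) (l : List String) (x : String) :
    pvAppend a (l ++ [x]) =
      (if x == "" then pvAppend a l else PySem.Str.strip (pvAppend a l ++ " " ++ x)) := by
  unfold pvAppend
  rw [List.foldl_append]
  simp [List.foldl]

lemma pvAStep_anchor (st : String × Option String) (x : String)
    (h : pvIsAnchor (PySem.Str.strip x) = true) :
    pvAStep st x = (pvContent (PySem.Str.strip x), some "answer") := by
  simp only [pvIsAnchor] at h
  simp at h
  simp [pvAStep, h]

lemma pvAStep_not_anchor (st : String × Option String) (x : String)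
    (h : pvIsAnchor (PySem.Str.strip x) = false) :
    pvAStep st x = (if st.2 == some "answer" && !(PySem.Str.strip x == "") then
        (PySem.Str.strip (st.1 ++ " " ++ PySem.Str.strip x), st.2) else st) := by
  simp only [pvIsAnchor] at h
  simp at h
  simp [pvAStep, h]

-- characterisation of A's single stateful pass by B's last-anchor decomposition
lemma pvFoldA_char : ∀ (L : List String) (ans : String) (sec : Option String),
    L.foldl pvAStep (ans, sec) =
      (match pvScan (L.map PySem.Str.strip) with
       | some i =>
         (pvAppend (pvContent (PySem.List.pyGetD (L.map PySem.Str.strip) i ""))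
            (PySem.List.slice (L.map PySem.Str.strip) (some (i + 1)) none), some "answer")
       | none =>
         ((if sec == some "answer" then pvAppend ans (L.map PySem.Str.strip) else ans), sec)) := by
  intro L
  induction L using List.reverseRecOn with
  | nil =>
    intro ans sec
    cases h : sec == some "answer" <;> simp [pvScan, PySem.List.enumerate_nil, pvAppend, h]
  | append_singleton l x ih =>
    intro ans sec
    rw [List.foldl_append, List.map_append, List.map_singleton, pvScan_append_singleton]
    simp only [List.foldl_cons, List.foldl_nil]
    rw [ih]
    cases hx : pvIsAnchor (PySem.Str.strip x)
    case true =>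
      -- last line is an anchor: the fold's value is its content, nothing follows it
      rw [pvAStep_anchor _ _ hx]
      simp only [hx, if_true]
      have hget : PySem.List.pyGetD (l.map PySem.Str.strip ++ [PySem.Str.strip x])
          ((l.map PySem.Str.strip).length : Int) "" = PySem.Str.strip x := by
        rw [PySem.List.pyGetD_natCast]
        simp [List.getD]
      have hslice : PySem.List.slice (l.map PySem.Str.strip ++ [PySem.Str.strip x])
          (some (((l.map PySem.Str.strip).length : Int) + 1)) none = [] := by
        have h1 : (((l.map PySem.Str.strip).length : Int) + 1) = (((l.map PySem.Str.strip).length + 1 : Nat) : Int) := by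
          push_cast; ring
        rw [h1, PySem.List.slice_from_natCast]
        simp
      rw [hget, hslice]
      simp [pvAppend]
    case false =>
      rw [pvAStep_not_anchor _ _ hx]
      simp only [hx, Bool.false_eq_true, if_false]
      cases hscan : pvScan (l.map PySem.Str.strip) with
      | none =>
        rw [pvAppend_append_singleton]
        cases hsec : sec == some "answer" <;>
          cases hs : PySem.Str.strip x == "" <;>
            simp [hsec, hs]
      | some i =>
        dsimp only
        obtain ⟨hi0, hilt⟩ := pvScan_bound _ _ hscan
        have hlen : i.toNat < (l.map PySem.Str.strip).length := by omega
        have hget : PySem.List.pyGetD (l.map PySem.Str.strip ++ [PySem.Str.strip x]) i "" =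
            PySem.List.pyGetD (l.map PySem.Str.strip) i "" := by
          rw [PySem.List.pyGetD_of_nonneg _ _ hi0, PySem.List.pyGetD_of_nonneg _ _ hi0]
          exact List.getD_append _ _ _ _ hlen
        have hslice : PySem.List.slice (l.map PySem.Str.strip ++ [PySem.Str.strip x]) (some (i + 1)) none =
            PySem.List.slice (l.map PySem.Str.strip) (some (i + 1)) none ++ [PySem.Str.strip x] := by
          rw [PySem.List.slice_from _ (by omega), PySem.List.slice_from _ (by omega)]
          exact List.drop_append_of_le_length (by omega)
        rw [hget, hslice, pvAppend_append_singleton]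
        cases hs : PySem.Str.strip x == "" <;> simp [hs]

-- the alt port, written with pvScan/pvAppend (definitional)
lemma pvAlt_eq (text : String) :
    parse_open_ended_response_alt text =
      (match pvScan ((PySem.Str.splitlines text).map PySem.Str.strip) with
       | none => PySem.Str.strip text
       | some i =>
         let answer := pvContent (PySem.List.pyGetD ((PySem.Str.splitlines text).map PySem.Str.strip) i "")
         let answer := pvAppend answer
             (PySem.List.slice ((PySem.Str.splitlines text).map PySem.Str.strip) (some (i + 1)) none)
         if answer == "" then PySem.Str.strip text else PySem.Str.strip answer) := rfl

-- ===== VERDICT (by name: the statement is the Claim_ definition above) =====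
theorem parse_open_ended_response_spec : Claim_equal_parse_open_ended_response := by
  intro text _
  unfold Spec_parse_open_ended_response
  rw [pvAlt_eq]
  show PySem.Str.strip _ = _
  rw [pvFoldA_char]
  cases hscan : pvScan ((PySem.Str.splitlines text).map PySem.Str.strip) with
  | none => simp [pv_strip_strip]
  | some i =>
    dsimp only
    cases ha : pvAppend (pvContent (PySem.List.pyGetD ((PySem.Str.splitlines text).map PySem.Str.strip) i ""))
        (PySem.List.slice ((PySem.Str.splitlines text).map PySem.Str.strip) (some (i + 1)) none) == "" <;>
      simp [ha, pv_strip_strip]
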